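-- pv_equiv track=rewrite | github.com/RatnakarVise/technical_spec_gen_llm_op | app/doc/doc_constructor_agent.py | find_all_table_like_chunks
-- ===== SOURCE A (Python) =====
-- def find_all_table_like_chunks(text):
--     """
--     Splits text into possible tables (blocks with at least 2 lines containing pipes)
--     and other text. Returns list of ('table', ...) and ('text', ...) chunks.
--     """
--     if not text or not text.strip():
--         return []
--     lines = text.splitlines()
--     chunks = []
--     buf = []
--     in_table = False
--
--     def flush(par, typ):
--         s = "\n".join(par).strip()
--         if s:
--             chunks.append((typ, s))
--
--     i = 0
--     while i < len(lines):
--         l = lines[i]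
--         if l.count('|') >= 1 and l.strip() and (i+1<len(lines) and lines[i+1].count('|')>=1):
--             # Start of table block
--             buf = [l]
--             i += 1
--             while i < len(lines) and lines[i].count('|') >= 1 and lines[i].strip():
--                 buf.append(lines[i])
--                 i += 1
--             flush(buf, "table")
--             buf = []
--         else:
--             if l.strip():
--                 flush([l], "text")
--             i += 1
--     return chunks
-- ===== SOURCE B (Python) =====
-- def find_all_table_like_chunks(text):
--     """One left-to-right pass that accumulates maximal runs of pipe-containing
--     lines, instead of an index loop with lookahead and a nested inner while."""
--     if not text or not text.strip():
--         return []
--     chunks = []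
--     run = []
--
--     def close():
--         if len(run) >= 2:
--             chunks.append(("table", "\n".join(run).strip()))
--         elif run:
--             chunks.append(("text", run[0].strip()))
--         run.clear()
--
--     for l in text.splitlines():
--         if '|' in l:
--             run.append(l)
--         else:
--             close()
--             s = l.strip()
--             if s:
--                 chunks.append(("text", s))
--     close()
--     return chunks
-- ===== Notes on version B (the rewrite author's own statement) =====
-- stated objective: simpler
-- what changed: Replaces A's index-based while loop with lookahead at lines[i+1] and a nested inner while by a single left-to-right pass that accumulates maximal runs of pipe-containing lines and closes each run as a table (>=2 lines) or a text chunk.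
import Mathlib
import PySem

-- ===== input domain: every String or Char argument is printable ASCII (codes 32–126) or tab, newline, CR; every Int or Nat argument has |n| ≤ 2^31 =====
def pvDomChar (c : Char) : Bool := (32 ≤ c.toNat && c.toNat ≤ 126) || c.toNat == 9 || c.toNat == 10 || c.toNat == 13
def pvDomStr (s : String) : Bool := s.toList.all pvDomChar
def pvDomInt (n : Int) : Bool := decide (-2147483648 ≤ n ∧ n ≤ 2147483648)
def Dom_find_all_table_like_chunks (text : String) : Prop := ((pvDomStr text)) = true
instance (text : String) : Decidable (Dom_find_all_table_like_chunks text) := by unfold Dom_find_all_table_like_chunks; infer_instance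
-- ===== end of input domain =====

-- B replaces A's index loop with lookahead and nested inner while by a single
-- left-to-right pass accumulating maximal runs of pipe-containing lines (objective: simpler).


-- ===== PORT A =====
-- flush(par, typ): s = "\n".join(par).strip(); if s: chunks.append((typ, s))
def pvFlush (chunks : List (String × String)) (par : List (List Char)) (typ : String) :
    List (String × String) :=
  let s := PySem.Chars.strip (PySem.Chars.join ['\n'] par)
  if !s.isEmpty then chunks ++ [(typ, String.ofList s)] else chunks

-- inner while: while i < len(lines) and lines[i].count('|') >= 1 and lines[i].strip(): buf.append(lines[i]); i += 1
def pvInner : List (List Char) → List (List Char) → List (List Char) × List (List Char)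
  | [], buf => (buf, [])
  | l :: rest, buf =>
    if decide (1 ≤ PySem.Chars.count l ['|']) && !(PySem.Chars.strip l).isEmpty then
      pvInner rest (buf ++ [l])
    else (buf, l :: rest)

-- i+1 < len(lines) and lines[i+1].count('|') >= 1, read off the suffix after lines[i]
def pvNextPipe : List (List Char) → Bool
  | [] => false
  | l2 :: _ => decide (1 ≤ PySem.Chars.count l2 ['|'])

theorem pvInner_snd_length (lines buf : List (List Char)) :
    (pvInner lines buf).2.length ≤ lines.length := by
  induction lines generalizing buf with
  | nil => simp [pvInner]
  | cons l rest ih =>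
    simp only [pvInner]
    split
    · exact Nat.le_succ_of_le (ih _)
    · simp

-- the outer while over the suffix of lines starting at i
def pvLoopA : List (List Char) → List (String × String) → List (String × String)
  | [], chunks => chunks
  | l :: rest, chunks =>
    if decide (1 ≤ PySem.Chars.count l ['|']) && !(PySem.Chars.strip l).isEmpty
        && pvNextPipe rest then
      pvLoopA (pvInner rest [l]).2 (pvFlush chunks (pvInner rest [l]).1 "table")
    else
      pvLoopA rest (if !(PySem.Chars.strip l).isEmpty then pvFlush chunks [l] "text" else chunks)
termination_by lines => lines.length
decreasing_by
  · exact Nat.lt_succ_of_le (pvInner_snd_length rest [l])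
  · exact Nat.lt_succ_self _

def find_all_table_like_chunks (text : String) : List (String × String) :=
  let cs := text.toList
  if cs.isEmpty || (PySem.Chars.strip cs).isEmpty then []
  else pvLoopA (PySem.Chars.splitlines cs) []

-- ===== PORT B =====
-- close(): len(run) >= 2 -> table chunk; elif run -> text chunk of run[0]
def pvClose (chunks : List (String × String)) (run : List (List Char)) :
    List (String × String) :=
  if 2 ≤ run.length then
    chunks ++ [("table", String.ofList (PySem.Chars.strip (PySem.Chars.join ['\n'] run)))]
  else
    match run with
    | [] => chunks
    | l :: _ => chunks ++ [("text", String.ofList (PySem.Chars.strip l))]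

-- for l in text.splitlines(): accumulate pipe runs, close on a non-pipe line
def pvLoopB : List (List Char) → List (String × String) → List (List Char) → List (String × String)
  | [], chunks, run => pvClose chunks run
  | l :: rest, chunks, run =>
    if PySem.Chars.isIn ['|'] l then
      pvLoopB rest chunks (run ++ [l])
    else
      let chunks' := pvClose chunks run
      let s := PySem.Chars.strip l
      pvLoopB rest (if !s.isEmpty then chunks' ++ [("text", String.ofList s)] else chunks') []

def find_all_table_like_chunks_alt (text : String) : List (String × String) :=
  let cs := text.toList
  if cs.isEmpty || (PySem.Chars.strip cs).isEmpty then []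
  else pvLoopB (PySem.Chars.splitlines cs) [] []

-- ===== PRECONDITION & SPEC =====
def Spec_find_all_table_like_chunks (text : String) (out : List (String × String)) : Prop := out = find_all_table_like_chunks_alt text
instance (text : String) (out : List (String × String)) : Decidable (Spec_find_all_table_like_chunks text out) := by unfold Spec_find_all_table_like_chunks; infer_instance

-- ===== CLAIM (what is proved, stated in full; the proofs are below) =====
def Claim_equal_find_all_table_like_chunks : Prop := ∀ (text : String), Dom_find_all_table_like_chunks text → Spec_find_all_table_like_chunks text (find_all_table_like_chunks text)

-- ===== LEMMAS AND PROOFS =====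
theorem pv_count_go_single (fuel : Nat) (l : List Char) (acc : Nat) (h : l.length ≤ fuel) :
    PySem.Chars.count.go ['|'] fuel l acc = acc + l.count '|' := by
  induction fuel generalizing l acc with
  | zero =>
    have : l = [] := List.length_eq_zero_iff.mp (Nat.le_zero.mp h)
    subst this; simp [PySem.Chars.count.go]
  | succ n ih =>
    cases l with
    | nil => simp [PySem.Chars.count.go]
    | cons c t =>
      simp only [PySem.Chars.count.go, List.isPrefixOf]
      by_cases hc : c = '|'
      · subst hc
        simp only [List.length_cons] at h
        simp [ih t (acc+1) (Nat.le_of_succ_le_succ h)]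
        omega
      · simp only [List.length_cons] at h
        have hb : ('|' == c && List.isPrefixOf [] t) = false := by
          simp; exact fun hh => hc hh.symm
        simp [ih t acc (Nat.le_of_succ_le_succ h), hc]
        intro hh; exact absurd hh.symm hc
theorem pv_pipeA_iff (l : List Char) :
    (decide (1 ≤ PySem.Chars.count l ['|']) = true) ↔ '|' ∈ l := by
  simp [PySem.Chars.count, pv_count_go_single l.length l 0 le_rfl]
theorem pv_pipeB_iff (l : List Char) :
    (PySem.Chars.isIn ['|'] l = true) ↔ '|' ∈ l := by
  rw [PySem.Chars.isIn_iff_infix]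
  constructor
  · intro h; exact h.mem (by simp)
  · intro h
    rcases List.mem_iff_append.mp h with ⟨a, b, rfl⟩
    exact ⟨a, b, by simp⟩
theorem pv_strip_nil_iff (l : List Char) :
    PySem.Chars.strip l = [] ↔ ∀ c ∈ l, PySem.Chars.isspace c = true := by
  unfold PySem.Chars.strip PySem.Chars.rstrip PySem.Chars.lstrip
  constructor
  · intro h c hc
    rw [List.reverse_eq_nil_iff, List.dropWhile_eq_nil_iff] at h
    have h' : ∀ x ∈ List.dropWhile PySem.Chars.isspace l, PySem.Chars.isspace x = true := by
      intro x hx; exact h x (List.mem_reverse.mpr hx)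
    have hl : l = List.takeWhile PySem.Chars.isspace l ++ List.dropWhile PySem.Chars.isspace l :=
      (List.takeWhile_append_dropWhile).symm
    rw [hl] at hc
    rcases List.mem_append.mp hc with h1 | h1
    · exact List.mem_takeWhile_imp h1
    · exact h' _ h1
  · intro h
    have : List.dropWhile PySem.Chars.isspace l = [] := List.dropWhile_eq_nil_iff.mpr h
    simp [this]
theorem pv_strip_ne_of_pipe {l : List Char} (h : '|' ∈ l) :
    (PySem.Chars.strip l).isEmpty = false := by
  rw [List.isEmpty_eq_false_iff, Ne, pv_strip_nil_iff]
  intro hall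
  have := hall _ h
  simp [PySem.Chars.isspace] at this
theorem pv_condA_eq (l : List Char) :
    (decide (1 ≤ PySem.Chars.count l ['|']) && !(PySem.Chars.strip l).isEmpty)
      = PySem.Chars.isIn ['|'] l := by
  by_cases h : '|' ∈ l
  · simp [(pv_pipeA_iff l).mpr h, pv_strip_ne_of_pipe h, (pv_pipeB_iff l).mpr h]
  · have h1 : decide (1 ≤ PySem.Chars.count l ['|']) = false := by
      rw [Bool.eq_false_iff]; intro hh; exact h ((pv_pipeA_iff l).mp hh)
    have h2 : PySem.Chars.isIn ['|'] l = false := by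
      rw [Bool.eq_false_iff]; intro hh; exact h ((pv_pipeB_iff l).mp hh)
    simp [h1, h2]
theorem pv_inner_span (lines : List (List Char)) : ∀ (buf : List (List Char)),
    pvInner lines buf =
      (buf ++ lines.takeWhile (fun l => PySem.Chars.isIn ['|'] l),
       lines.dropWhile (fun l => PySem.Chars.isIn ['|'] l)) := by
  induction lines with
  | nil => intro buf; simp [pvInner]
  | cons l rest ih =>
    intro buf
    simp only [pvInner, pv_condA_eq, List.takeWhile, List.dropWhile]
    cases h : PySem.Chars.isIn ['|'] l with
    | true => simp [ih (buf ++ [l])]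
    | false => simp
theorem pv_loopB_run (lines : List (List Char)) :
    ∀ (chunks : List (String × String)) (run : List (List Char)),
    pvLoopB lines chunks run =
      pvLoopB (lines.dropWhile (fun l => PySem.Chars.isIn ['|'] l))
        (pvClose chunks (run ++ lines.takeWhile (fun l => PySem.Chars.isIn ['|'] l))) [] := by
  induction lines with
  | nil => intro chunks run; simp [pvLoopB, pvClose]
  | cons l rest ih =>
    intro chunks run
    simp only [pvLoopB, List.takeWhile, List.dropWhile]
    cases h : PySem.Chars.isIn ['|'] l with
    | true =>
      rw [ih chunks (run ++ [l])]
      simp [List.append_assoc]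
    | false =>
      simp only [pvLoopB, h, Bool.false_eq_true, if_false, List.append_nil]
      rfl

theorem pv_join_head (sep : List Char) (l : List Char) (rest : List (List Char)) :
    ∃ suf, PySem.Chars.join sep (l :: rest) = l ++ suf := by
  cases rest with
  | nil => exact ⟨[], by simp [PySem.Chars.join, List.intercalate]⟩
  | cons y t =>
    exact ⟨sep ++ PySem.Chars.join sep (y :: t), by
      simp [PySem.Chars.join, List.intercalate, List.intersperse]⟩

theorem pv_join_strip_ne_of_pipe {l : List Char} (rest : List (List Char)) (h : '|' ∈ l) :
    (PySem.Chars.strip (PySem.Chars.join ['\n'] (l :: rest))).isEmpty = false := by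
  rcases pv_join_head ['\n'] l rest with ⟨suf, hj⟩
  have : '|' ∈ PySem.Chars.join ['\n'] (l :: rest) := by
    rw [hj]; exact List.mem_append.mpr (Or.inl h)
  exact pv_strip_ne_of_pipe this

theorem pv_flush_single (chunks : List (String × String)) (l : List Char) (typ : String) :
    pvFlush chunks [l] typ
      = if !(PySem.Chars.strip l).isEmpty
          then chunks ++ [(typ, String.ofList (PySem.Chars.strip l))] else chunks := by
  simp [pvFlush]

theorem pv_loopA_eq_loopB_aux : ∀ (n : Nat) (lines : List (List Char)), lines.length ≤ n →
    ∀ (chunks : List (String × String)), pvLoopA lines chunks = pvLoopB lines chunks [] := by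
  intro n
  induction n with
  | zero =>
    intro lines h chunks
    have : lines = [] := List.length_eq_zero_iff.mp (Nat.le_zero.mp h)
    subst this
    simp [pvLoopA, pvLoopB, pvClose]
  | succ n ih =>
    intro lines h chunks
    cases lines with
    | nil => simp [pvLoopA, pvLoopB, pvClose]
    | cons l rest =>
      simp only [List.length_cons, Nat.add_le_add_iff_right] at h
      by_cases hp : '|' ∈ l
      · have hA : decide (1 ≤ PySem.Chars.count l ['|']) = true := (pv_pipeA_iff l).mpr hp
        have hS : (PySem.Chars.strip l).isEmpty = false := pv_strip_ne_of_pipe hp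
        have hB : PySem.Chars.isIn ['|'] l = true := (pv_pipeB_iff l).mpr hp
        cases rest with
        | nil =>
          simp only [pvLoopA, pvNextPipe, hA, hS, hB, Bool.and_false, Bool.false_eq_true,
            if_false, Bool.not_false, if_true, pv_flush_single, pvLoopB, if_true]
          simp [pvClose]
        | cons l2 rest2 =>
          by_cases hp2 : '|' ∈ l2
          · have hA2 : decide (1 ≤ PySem.Chars.count l2 ['|']) = true := (pv_pipeA_iff l2).mpr hp2
            have hB2 : PySem.Chars.isIn ['|'] l2 = true := (pv_pipeB_iff l2).mpr hp2
            have hcond : (decide (1 ≤ PySem.Chars.count l ['|']) && !(PySem.Chars.strip l).isEmpty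
                && pvNextPipe (l2 :: rest2)) = true := by
              simp [hA, hS, pvNextPipe, hA2]
            rw [pvLoopA]
            rw [if_pos hcond]
            rw [pv_inner_span]
            -- B side
            rw [pvLoopB, if_pos hB, pv_loopB_run]
            simp only [List.nil_append]
            have htk : (l2 :: rest2).takeWhile (fun l => PySem.Chars.isIn ['|'] l)
                = l2 :: rest2.takeWhile (fun l => PySem.Chars.isIn ['|'] l) := by
              simp [List.takeWhile, hB2]
            have hdr : (l2 :: rest2).dropWhile (fun l => PySem.Chars.isIn ['|'] l)
                = rest2.dropWhile (fun l => PySem.Chars.isIn ['|'] l) := by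
              simp [List.dropWhile, hB2]
            rw [htk, hdr]
            have hflush : pvFlush chunks
                ([l] ++ l2 :: rest2.takeWhile (fun l => PySem.Chars.isIn ['|'] l)) "table"
                = pvClose chunks ([l] ++ l2 :: rest2.takeWhile (fun l => PySem.Chars.isIn ['|'] l)) := by
              simp [pvFlush, pvClose, pv_join_strip_ne_of_pipe _ hp]
            rw [hflush]
            have hlen : (rest2.dropWhile (fun l => PySem.Chars.isIn ['|'] l)).length ≤ n := by
              have := List.length_dropWhile_le (p := fun l => PySem.Chars.isIn ['|'] l) rest2
              simp only [List.length_cons] at h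
              omega
            exact ih _ hlen _
          · have hB2 : PySem.Chars.isIn ['|'] l2 = false := by
              rw [Bool.eq_false_iff]; intro hh; exact hp2 ((pv_pipeB_iff l2).mp hh)
            have hA2 : decide (1 ≤ PySem.Chars.count l2 ['|']) = false := by
              rw [Bool.eq_false_iff]; intro hh; exact hp2 ((pv_pipeA_iff l2).mp hh)
            have hcond : (decide (1 ≤ PySem.Chars.count l ['|']) && !(PySem.Chars.strip l).isEmpty
                && pvNextPipe (l2 :: rest2)) = false := by
              simp [pvNextPipe, hA2]
            rw [pvLoopA, if_neg (by simp [hcond]), hS]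
            simp only [Bool.not_false, if_true, pv_flush_single, hS]
            rw [pvLoopB, if_pos hB, pv_loopB_run]
            have htk : (l2 :: rest2).takeWhile (fun l => PySem.Chars.isIn ['|'] l) = [] := by
              simp [List.takeWhile, hB2]
            have hdr : (l2 :: rest2).dropWhile (fun l => PySem.Chars.isIn ['|'] l)
                = l2 :: rest2 := by
              simp [List.dropWhile, hB2]
            rw [htk, hdr]
            have hclose : pvClose chunks ([] ++ [l] ++ [])
                = chunks ++ [("text", String.ofList (PySem.Chars.strip l))] := by
              simp [pvClose]
            rw [hclose]
            exact ih _ h _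
      · have hA1 : decide (1 ≤ PySem.Chars.count l ['|']) = false := by
          rw [Bool.eq_false_iff]; intro hh; exact hp ((pv_pipeA_iff l).mp hh)
        have hB1 : PySem.Chars.isIn ['|'] l = false := by
          rw [Bool.eq_false_iff]; intro hh; exact hp ((pv_pipeB_iff l).mp hh)
        rw [pvLoopA, if_neg (by simp [hA1])]
        rw [pvLoopB]
        simp only [hB1, Bool.false_eq_true, if_false]
        have hc0 : pvClose chunks [] = chunks := by simp [pvClose]
        simp only [pv_flush_single, hc0]
        cases hc : (PySem.Chars.strip l).isEmpty with
        | true =>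
          simp only [Bool.not_true, Bool.false_eq_true, if_false]
          exact ih _ h _
        | false =>
          simp only [Bool.not_false, if_true]
          exact ih _ h _

theorem pv_loopA_eq_loopB (lines : List (List Char)) (chunks : List (String × String)) :
    pvLoopA lines chunks = pvLoopB lines chunks [] :=
  pv_loopA_eq_loopB_aux lines.length lines le_rfl chunks

-- ===== VERDICT (by name: the statement is the Claim_ definition above) =====
theorem find_all_table_like_chunks_spec : Claim_equal_find_all_table_like_chunks := by
  intro text _
  unfold Spec_find_all_table_like_chunks find_all_table_like_chunks find_all_table_like_chunks_alt
  simp only []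
  split
  · rfl
  · exact pv_loopA_eq_loopB _ _
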